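-- pv_equiv track=rewrite | github.com/songzy12/HackerRank | Algorithms/Strings/weighted_uniform_strings.py | compute_weights
-- ===== SOURCE A (Python) =====
-- import string
--
-- def compute_weights(s):
--     weights_map = {c: ord(c) - ord("a") + 1 for c in string.ascii_lowercase}
--
--     weights = set()
--     i = 0
--     last_char = ""
--     cur_length = 1
--     while i < len(s):
--         if i == 0 or s[i] != s[i - 1]:
--             last_char = s[i]
--             cur_length = 1
--         else:
--             cur_length += 1
--         weights.add(weights_map[s[i]] * cur_length)
--         i += 1
--
--     return weights
-- ===== SOURCE B (Python) =====
-- import string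
--
-- def compute_weights(s):
--     weights_map = {c: ord(c) - ord("a") + 1 for c in string.ascii_lowercase}
--
--     # Phase 1: split s into maximal runs of identical characters.
--     runs = []
--     for ch in s:
--         if runs and runs[-1][0] == ch:
--             runs[-1][1] += 1
--         else:
--             runs.append([ch, 1])
--
--     # Phase 2: each run of char c and length L contributes w(c)*1 .. w(c)*L.
--     weights = set()
--     for ch, length in runs:
--         w = weights_map[ch]
--         for j in range(1, length + 1):
--             weights.add(w * j)
--     return weights
-- ===== Notes on version B (the rewrite author's own statement) =====
-- stated objective: faster
-- what changed: B splits the string into maximal runs first and then expands each run with a nested loop over lengths 1..L, doing one weights_map lookup per run, instead of A's single pass with a running same-as-previous counter and a dict lookup per character.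
import Mathlib
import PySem

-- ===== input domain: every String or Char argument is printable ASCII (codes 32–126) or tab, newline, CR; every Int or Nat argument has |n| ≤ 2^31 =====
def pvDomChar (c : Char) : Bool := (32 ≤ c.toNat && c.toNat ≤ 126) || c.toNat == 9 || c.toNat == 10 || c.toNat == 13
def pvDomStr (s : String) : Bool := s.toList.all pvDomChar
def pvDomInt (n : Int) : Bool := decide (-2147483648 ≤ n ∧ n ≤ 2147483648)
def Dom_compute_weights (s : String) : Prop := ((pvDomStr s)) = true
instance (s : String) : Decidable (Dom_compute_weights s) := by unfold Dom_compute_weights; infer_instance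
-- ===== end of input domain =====

-- B changes the decomposition: group the string into maximal runs first, then a nested loop
-- emits each run's multiples; one dict lookup per run instead of one per character.

-- ===== PORT A =====
-- weights_map = {c: ord(c) - ord("a") + 1 for c in string.ascii_lowercase}
def pvWeightsMap : PySem.Dict Char Int :=
  "abcdefghijklmnopqrstuvwxyz".toList.foldl
    (fun d c => d.insert c ((c.toNat : Int) - ('a'.toNat : Int) + 1)) PySem.Dict.empty

-- weights_map[c]; KeyError (non-lowercase c) is excluded by Pre_compute_weights, so getD 0 is exact there
def pvWt (c : Char) : Int := (pvWeightsMap.get? c).getD 0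

-- A's while loop: prev = none models i == 0 (last_char = "" before the loop);
-- branch order as in Python: "if i == 0 or s[i] != s[i-1]" then new run else increment.
def pvLoopA : List Char → Option Char → Int → PySem.Set Int → PySem.Set Int
  | [], _, _, w => w
  | c :: rest, prev, curLen, w =>
      if prev = none ∨ prev ≠ some c then
        pvLoopA rest (some c) 1 (w.add (pvWt c * 1))
      else
        pvLoopA rest (some c) (curLen + 1) (w.add (pvWt c * (curLen + 1)))

def compute_weights (s : String) : List Int :=
  pvLoopA s.toList none 1 PySem.Set.empty

-- ===== PORT B =====
-- Source B rebuilds the same comprehension dict for itself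
def pvWeightsMapB : PySem.Dict Char Int :=
  "abcdefghijklmnopqrstuvwxyz".toList.foldl
    (fun d c => d.insert c ((c.toNat : Int) - ('a'.toNat : Int) + 1)) PySem.Dict.empty

-- weights_map[ch] in Source B; KeyError excluded by Pre_compute_weights
def pvWtB (c : Char) : Int := (pvWeightsMapB.get? c).getD 0

-- Phase 1 of Source B: build the run list; runs[-1][1] += 1 ↔ replace the last pair.
def pvAddRun (runs : List (Char × Int)) (ch : Char) : List (Char × Int) :=
  match runs.getLast? with
  | some (c, n) => if c = ch then runs.dropLast ++ [(c, n + 1)] else runs ++ [(ch, 1)]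
  | none => [(ch, 1)]

-- Phase 2 of Source B: for j in range(1, length + 1): weights.add(w * j)
def pvExpandRun (acc : PySem.Set Int) (ch : Char) (len : Int) : PySem.Set Int :=
  (PySem.List.pyRange 1 (len + 1)).foldl (fun a j => a.add (pvWtB ch * j)) acc

def compute_weights_alt (s : String) : List Int :=
  let runs := s.toList.foldl pvAddRun []
  runs.foldl (fun acc r => pvExpandRun acc r.1 r.2) PySem.Set.empty

-- ===== PRECONDITION & SPEC =====
-- Pre_ excludes exactly the strings containing a non-lowercase-ASCII-letter character,
-- on which the Python A raises KeyError at the weights_map lookup (B raises there too).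
def Pre_compute_weights (s : String) : Prop :=
  (s.toList.all (fun c => 97 ≤ c.toNat && c.toNat ≤ 122)) = true
instance (s : String) : Decidable (Pre_compute_weights s) := by
  unfold Pre_compute_weights; infer_instance

def pvWitness_compute_weights : String := "aabccc"

def Spec_compute_weights (s : String) (out : List Int) : Prop := out = compute_weights_alt s
instance (s : String) (out : List Int) : Decidable (Spec_compute_weights s out) := by
  unfold Spec_compute_weights; infer_instance

-- ===== CLAIM (what is proved, stated in full; the proofs are below) =====
def Claim_equal_compute_weights : Prop :=
  ∀ (s : String), Dom_compute_weights s → Pre_compute_weights s →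
    Spec_compute_weights s (compute_weights s)

-- ===== LEMMAS AND PROOFS =====

-- the two ports build the identical weights dict
lemma pvWtB_eq_pvWt : pvWtB = pvWt := rfl

-- length of the maximal leading run of ch
def pvRunLen (ch : Char) : List Char → Nat
  | [] => 0
  | c :: r => if c = ch then pvRunLen ch r + 1 else 0

lemma pvRunLen_le (ch : Char) (l : List Char) : pvRunLen ch l ≤ l.length := by
  induction l with
  | nil => simp [pvRunLen]
  | cons c r ih =>
      by_cases h : c = ch <;> simp [pvRunLen, h]
      omega

lemma pvDrop_runLen_head (ch : Char) (l : List Char) :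
    (l.drop (pvRunLen ch l)).head? ≠ some ch := by
  induction l with
  | nil => simp
  | cons c r ih =>
      by_cases h : c = ch
      · simpa [pvRunLen, h] using ih
      · simp [pvRunLen, h]

-- A restarts a run whenever the head differs from prev
lemma pvLoopA_restart (l : List Char) (prev : Option Char) (n : Int) (acc : PySem.Set Int)
    (h : l.head? ≠ prev ∨ prev = none) :
    pvLoopA l prev n acc = pvLoopA l none 1 acc := by
  cases l with
  | nil => rfl
  | cons c r =>
      have hcond : prev = none ∨ prev ≠ some c := by
        rcases h with h | h
        · by_cases hp : prev = none
          · exact Or.inl hp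
          · right; intro he; exact h (by simp [he])
        · exact Or.inl h
      simp [pvLoopA, hcond]

-- adds w*(n+1), …, w*(n+k) one at a time (A's behaviour inside a run)
def pvAddSeq (acc : PySem.Set Int) (w : Int) (n : Int) : Nat → PySem.Set Int
  | 0 => acc
  | Nat.succ k => pvAddSeq (acc.add (w * (n + 1))) w (n + 1) k

-- A consumes a maximal run, adding exactly pvAddSeq of its multiples
lemma pvLoopA_run (ch : Char) (l : List Char) : ∀ (n : Int) (acc : PySem.Set Int),
    pvLoopA l (some ch) n acc =
      pvLoopA (l.drop (pvRunLen ch l)) (some ch) (n + pvRunLen ch l)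
        (pvAddSeq acc (pvWt ch) n (pvRunLen ch l)) := by
  induction l with
  | nil => intro n acc; simp [pvRunLen, pvAddSeq]
  | cons c r ih =>
      intro n acc
      by_cases h : c = ch
      · subst h
        have e1 : pvLoopA (c :: r) (some c) n acc
            = pvLoopA r (some c) (n + 1) (acc.add (pvWt c * (n + 1))) := by
          simp [pvLoopA]
        have e2 : pvRunLen c (c :: r) = pvRunLen c r + 1 := by simp [pvRunLen]
        rw [e1, ih (n + 1), e2, List.drop_succ_cons]
        have hn : n + 1 + ((pvRunLen c r : Nat) : Int)
            = n + (((pvRunLen c r + 1 : Nat)) : Int) := by push_cast; omega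
        rw [hn]
        rfl
      · have hcond : (some ch : Option Char) = none ∨ (some ch : Option Char) ≠ some c := by
          right; simp; intro he; exact h he.symm
        simp [pvRunLen, h, pvAddSeq]

-- pvAddSeq is B's range fold
lemma pvAddSeq_eq_range (w : Int) : ∀ (k : Nat) (n : Nat) (acc : PySem.Set Int),
    pvAddSeq acc w (n : Int) k =
      (PySem.List.pyRange ((n : Int) + 1) ((n : Int) + 1 + k)).foldl
        (fun a j => a.add (w * j)) acc := by
  intro k
  induction k with
  | zero =>
      intro n acc
      simp [pvAddSeq, PySem.List.pyRange]
  | succ k ih =>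
      intro n acc
      have hlt : (n : Int) + 1 < (n : Int) + 1 + ((k : Nat) + 1 : Nat) := by push_cast; omega
      rw [PySem.List.pyRange_one_cons hlt]
      show pvAddSeq acc w (n : Int) (k + 1) = _
      simp only [pvAddSeq, List.foldl_cons]
      have h2 : ((n : Int) + 1) = ((n + 1 : Nat) : Int) := by push_cast; omega
      rw [h2]
      rw [ih (n + 1) (acc.add (w * ((n + 1 : Nat) : Int)))]
      congr 1
      push_cast; ring

-- B's foldl pvAddRun only ever touches the last pair: pull a ready prefix out
lemma pvFoldAddRun_snoc (l : List Char) : ∀ (runs : List (Char × Int)) (c : Char) (n : Int),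
    l.foldl pvAddRun (runs ++ [(c, n)]) =
      runs ++ l.foldl pvAddRun [(c, n)] := by
  induction l with
  | nil => intro runs c n; simp
  | cons d r ih =>
      intro runs c n
      by_cases h : c = d
      · subst h
        have h1 : pvAddRun (runs ++ [(c, n)]) c = runs ++ [(c, n + 1)] := by
          simp [pvAddRun]
        have h2 : pvAddRun [(c, n)] c = [(c, n + 1)] := by
          simp [pvAddRun]
        simp only [List.foldl_cons, h1, h2, ih]
      · have h1 : pvAddRun (runs ++ [(c, n)]) d = (runs ++ [(c, n)]) ++ [(d, 1)] := by
          simp [pvAddRun, h]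
        have h2 : pvAddRun [(c, n)] d = [(c, n)] ++ [(d, 1)] := by
          simp [pvAddRun, h]
        simp only [List.foldl_cons, h1, h2]
        rw [ih (runs ++ [(c, n)]) d 1, ih [(c, n)] d 1, List.append_assoc]

-- B's run builder closes the leading run at its maximal length, then starts over
lemma pvFoldAddRun_run (ch : Char) (l : List Char) : ∀ (n : Int),
    l.foldl pvAddRun [(ch, n)] =
      (ch, n + pvRunLen ch l) :: (l.drop (pvRunLen ch l)).foldl pvAddRun [] := by
  induction l with
  | nil => intro n; simp [pvRunLen]
  | cons c r ih =>
      intro n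
      by_cases h : c = ch
      · subst h
        have h1 : pvAddRun [(c, n)] c = [(c, n + 1)] := by simp [pvAddRun]
        have e2 : pvRunLen c (c :: r) = pvRunLen c r + 1 := by simp [pvRunLen]
        rw [List.foldl_cons, h1, ih (n + 1), e2, List.drop_succ_cons]
        have hn : n + 1 + ((pvRunLen c r : Nat) : Int)
            = n + (((pvRunLen c r + 1 : Nat)) : Int) := by push_cast; omega
        rw [hn]
      · have h' : ¬ ch = c := fun he => h he.symm
        have h1 : pvAddRun [(ch, n)] c = [(ch, n)] ++ [(c, 1)] := by simp [pvAddRun, h']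
        have e2 : pvRunLen ch (c :: r) = 0 := by simp [pvRunLen, h]
        rw [List.foldl_cons, h1, pvFoldAddRun_snoc r [(ch, n)] c 1, e2, List.drop_zero]
        simp [pvAddRun]

-- main equivalence: A's single running-counter pass = B's group-then-expand pass
lemma pvMainAux : ∀ (m : Nat) (l : List Char), l.length ≤ m → ∀ (acc : PySem.Set Int),
    pvLoopA l none 1 acc =
      (l.foldl pvAddRun []).foldl (fun a r => pvExpandRun a r.1 r.2) acc := by
  intro m
  induction m with
  | zero =>
      intro l hl acc
      have : l = [] := List.eq_nil_of_length_eq_zero (Nat.le_zero.mp hl)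
      subst this; rfl
  | succ m ih =>
      intro l hl acc
      cases l with
      | nil => rfl
      | cons c r =>
          have hstep : pvLoopA (c :: r) none 1 acc
              = pvLoopA r (some c) 1 (acc.add (pvWt c * 1)) := by
            simp [pvLoopA]
          rw [hstep, pvLoopA_run]
          rw [pvLoopA_restart _ _ _ _ (Or.inl (pvDrop_runLen_head c r))]
          have hlen : (r.drop (pvRunLen c r)).length ≤ m := by
            have h1 := pvRunLen_le c r
            simp only [List.length_cons] at hl
            simp only [List.length_drop]
            omega
          rw [ih _ hlen]
          have hB : (c :: r).foldl pvAddRun [] =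
              (c, 1 + (pvRunLen c r : Int)) :: (r.drop (pvRunLen c r)).foldl pvAddRun [] := by
            simp only [List.foldl_cons]
            have : pvAddRun [] c = [(c, 1)] := by simp [pvAddRun]
            rw [this, pvFoldAddRun_run c r 1]
          rw [hB]
          simp only [List.foldl_cons]
          congr 1
          -- the two ways of adding the run's multiples coincide
          show pvAddSeq (acc.add (pvWt c * 1)) (pvWt c) 1 (pvRunLen c r)
              = pvExpandRun acc c (1 + (pvRunLen c r : Int))
          unfold pvExpandRun
          rw [pvWtB_eq_pvWt]
          have hlt : (1 : Int) < 1 + (pvRunLen c r : Int) + 1 := by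
            have : (0 : Int) ≤ (pvRunLen c r : Int) := Int.natCast_nonneg _
            omega
          rw [PySem.List.pyRange_one_cons hlt]
          simp only [List.foldl_cons]
          have h1 : (1 : Int) = ((1 : Nat) : Int) := by norm_num
          rw [h1, pvAddSeq_eq_range (pvWt c) (pvRunLen c r) 1 (acc.add (pvWt c * ((1 : Nat) : Int)))]
          congr 1
          push_cast; ring

-- ===== VERDICT (by name: the statement is the Claim_ definition above) =====
theorem compute_weights_spec : Claim_equal_compute_weights := by
  intro s _ _
  unfold Spec_compute_weights compute_weights compute_weights_alt
  exact pvMainAux s.toList.length s.toList le_rfl PySem.Set.empty
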